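-- pv_equiv track=rewrite | github.com/chpollin/FemPrompt_SozArb | analysis/extract_concepts_from_summaries.py | normalize_keyword
-- ===== SOURCE A (Python) =====
-- SYNONYMS = {
--     'algorithmic bias': ['Algorithmic Bias', 'AI bias', 'AI Bias'],
--     'algorithmic discrimination': ['Algorithmic Discrimination'],
--     'algorithmic fairness': ['fairness', 'Fairness', 'AI fairness', 'AI Fairness'],
--     'intersectionality': ['Intersectionality', 'intersectional bias'],
--     'gender bias': ['Gender Bias', 'gender equity'],
--     'generative ai': ['Generative AI', 'GenAI'],
--     'large language models': ['LLMs', 'LLM bias'],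
--     'responsible ai': ['Responsible AI', 'trustworthy AI', 'trust in AI'],
--     'bias mitigation': ['Bias Mitigation', 'debiasing'],
--     'feminist ai': ['Feminist AI'],
--     'ai ethics': ['AI ethics', 'ethical AI'],
--     'ai governance': ['AI governance'],
--     'visual bias': ['visual bias', 'image generation bias'],
--     'prompt engineering': ['prompting', 'prompt design'],
--     'social work': ['social work practice', 'professional context'],
--     'vulnerable populations': ['vulnerable groups', 'marginalized communities'],
--     'welfare systems': ['welfare surveillance', 'automated decision-making'],
-- }
--
-- def normalize_keyword(keyword):
--     """Normalize a keyword using synonym mapping."""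
--     keyword_lower = keyword.strip().lower()
--
--     # Check if it matches any canonical form or synonym
--     for canonical, synonyms in SYNONYMS.items():
--         if keyword_lower == canonical:
--             return canonical
--         for syn in synonyms:
--             if keyword_lower == syn.lower():
--                 return canonical
--
--     return keyword_lower
-- ===== SOURCE B (Python) =====
-- SYNONYMS = {
--     'algorithmic bias': ['Algorithmic Bias', 'AI bias', 'AI Bias'],
--     'algorithmic discrimination': ['Algorithmic Discrimination'],
--     'algorithmic fairness': ['fairness', 'Fairness', 'AI fairness', 'AI Fairness'],
--     'intersectionality': ['Intersectionality', 'intersectional bias'],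
--     'gender bias': ['Gender Bias', 'gender equity'],
--     'generative ai': ['Generative AI', 'GenAI'],
--     'large language models': ['LLMs', 'LLM bias'],
--     'responsible ai': ['Responsible AI', 'trustworthy AI', 'trust in AI'],
--     'bias mitigation': ['Bias Mitigation', 'debiasing'],
--     'feminist ai': ['Feminist AI'],
--     'ai ethics': ['AI ethics', 'ethical AI'],
--     'ai governance': ['AI governance'],
--     'visual bias': ['visual bias', 'image generation bias'],
--     'prompt engineering': ['prompting', 'prompt design'],
--     'social work': ['social work practice', 'professional context'],
--     'vulnerable populations': ['vulnerable groups', 'marginalized communities'],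
--     'welfare systems': ['welfare surveillance', 'automated decision-making'],
-- }
--
-- # Flat (alias_lower, canonical) table sorted by alias, built once at import time.
-- _PAIRS = []
-- for _canonical, _synonyms in SYNONYMS.items():
--     _PAIRS.append((_canonical, _canonical))
--     for _syn in _synonyms:
--         _PAIRS.append((_syn.lower(), _canonical))
-- _TABLE = sorted(_PAIRS, key=lambda p: p[0])
--
-- def normalize_keyword(keyword):
--     """Normalize a keyword using synonym mapping (binary search in a sorted alias table)."""
--     target = keyword.strip().lower()
--     lo, hi = 0, len(_TABLE) - 1
--     while lo <= hi:
--         mid = (lo + hi) // 2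
--         key, canonical = _TABLE[mid]
--         if key == target:
--             return canonical
--         if key < target:
--             lo = mid + 1
--         else:
--             hi = mid - 1
--     return target
-- ===== Notes on version B (the rewrite author's own statement) =====
-- stated objective: alternative
-- what changed: Replaces A's per-call nested linear scan over SYNONYMS (canonical, then each synonym lowercased on the fly) by a flat (lowercased alias, canonical) table built and sorted once at import time plus a hand-written binary search per call, with the lowercased keyword as fallback on a failed search.
import Mathlib
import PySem

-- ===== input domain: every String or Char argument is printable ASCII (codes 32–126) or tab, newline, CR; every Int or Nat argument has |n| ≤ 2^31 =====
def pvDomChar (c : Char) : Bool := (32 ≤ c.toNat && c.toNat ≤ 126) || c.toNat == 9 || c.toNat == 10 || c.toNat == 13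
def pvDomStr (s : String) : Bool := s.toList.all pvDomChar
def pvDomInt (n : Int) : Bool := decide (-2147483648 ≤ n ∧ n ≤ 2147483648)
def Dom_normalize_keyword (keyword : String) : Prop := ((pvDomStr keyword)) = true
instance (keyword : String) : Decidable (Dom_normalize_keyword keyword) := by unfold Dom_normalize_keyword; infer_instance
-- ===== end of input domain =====

-- B replaces A's per-call nested scan over SYNONYMS by a flat (alias, canonical) table sorted once at import time and a hand-written binary search per call (alternative algorithm).

-- shared module-level constant SYNONYMS (dict of canonical -> synonym list, insertion order)
def SYNONYMS : List (String × List String) :=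
  [ ("algorithmic bias", ["Algorithmic Bias", "AI bias", "AI Bias"]),
    ("algorithmic discrimination", ["Algorithmic Discrimination"]),
    ("algorithmic fairness", ["fairness", "Fairness", "AI fairness", "AI Fairness"]),
    ("intersectionality", ["Intersectionality", "intersectional bias"]),
    ("gender bias", ["Gender Bias", "gender equity"]),
    ("generative ai", ["Generative AI", "GenAI"]),
    ("large language models", ["LLMs", "LLM bias"]),
    ("responsible ai", ["Responsible AI", "trustworthy AI", "trust in AI"]),
    ("bias mitigation", ["Bias Mitigation", "debiasing"]),
    ("feminist ai", ["Feminist AI"]),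
    ("ai ethics", ["AI ethics", "ethical AI"]),
    ("ai governance", ["AI governance"]),
    ("visual bias", ["visual bias", "image generation bias"]),
    ("prompt engineering", ["prompting", "prompt design"]),
    ("social work", ["social work practice", "professional context"]),
    ("vulnerable populations", ["vulnerable groups", "marginalized communities"]),
    ("welfare systems", ["welfare surveillance", "automated decision-making"]) ]

-- ===== PORT A =====
-- inner 'for syn in synonyms: if keyword_lower == syn.lower(): return canonical'
def pvScanSyns (kl canonical : String) : List String → Option String
  | [] => none
  | syn :: rest =>
      if kl == PySem.Str.lower syn then some canonical else pvScanSyns kl canonical rest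

-- outer 'for canonical, synonyms in SYNONYMS.items(): …' with early returns
def pvScanTable (kl : String) : List (String × List String) → Option String
  | [] => none
  | (canonical, synonyms) :: rest =>
      if kl == canonical then some canonical
      else match pvScanSyns kl canonical synonyms with
        | some r => some r
        | none => pvScanTable kl rest

def normalize_keyword (keyword : String) : String :=
  let keyword_lower := PySem.Str.lower (PySem.Str.strip keyword)
  match pvScanTable keyword_lower SYNONYMS with
  | some r => r
  | none => keyword_lower

-- ===== PORT B =====
-- module-level loops of Source B: flatten SYNONYMS into (alias_lower, canonical) pairs, then sort by alias
def PAIRS : List (String × String) :=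
  SYNONYMS.foldl
    (fun acc p => p.2.foldl (fun acc syn => acc ++ [(PySem.Str.lower syn, p.1)]) (acc ++ [(p.1, p.1)]))
    []

def TABLE : List (String × String) := PySem.List.sorted PAIRS (fun p => p.1.toList) false  -- Python's string key order, ported on .toList (code-point lex order, Python-exact)

-- the 'while lo <= hi' binary-search loop of Source B; the fuel argument only makes the loop total
def bsLoop (tbl : List (String × String)) (target : String) : Nat → Int → Int → Option String
  | 0, _, _ => none
  | fuel + 1, lo, hi =>
      if lo ≤ hi then
        match PySem.List.pyGet? tbl (PySem.Int.floordiv (lo + hi) 2) with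
        | none => none
        | some (key, canonical) =>
            if key == target then some canonical
            -- Python's 'key < target', ported on .toList (code-point lex order, Python-exact)
            else if key.toList < target.toList then bsLoop tbl target fuel (PySem.Int.floordiv (lo + hi) 2 + 1) hi
            else bsLoop tbl target fuel lo (PySem.Int.floordiv (lo + hi) 2 - 1)
      else none

def normalize_keyword_alt (keyword : String) : String :=
  let target := PySem.Str.lower (PySem.Str.strip keyword)
  match bsLoop TABLE target (TABLE.length + 1) 0 ((TABLE.length : Int) - 1) with
  | some c => c
  | none => target

-- ===== PRECONDITION & SPEC =====
def Spec_normalize_keyword (keyword : String) (out : String) : Prop := out = normalize_keyword_alt keyword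
instance (keyword : String) (out : String) : Decidable (Spec_normalize_keyword keyword out) := by unfold Spec_normalize_keyword; infer_instance

-- ===== CLAIM (what is proved, stated in full; the proofs are below) =====
def Claim_equal_normalize_keyword : Prop := ∀ (keyword : String), Dom_normalize_keyword keyword → Spec_normalize_keyword keyword (normalize_keyword keyword)

-- ===== LEMMAS AND PROOFS =====
set_option maxRecDepth 20000 in
set_option maxHeartbeats 1000000 in
theorem pvTABLElit : TABLE = [("ai bias", "algorithmic bias"), ("ai bias", "algorithmic bias"), ("ai ethics", "ai ethics"), ("ai ethics", "ai ethics"), ("ai fairness", "algorithmic fairness"), ("ai fairness", "algorithmic fairness"), ("ai governance", "ai governance"), ("ai governance", "ai governance"), ("algorithmic bias", "algorithmic bias"), ("algorithmic bias", "algorithmic bias"), ("algorithmic discrimination", "algorithmic discrimination"), ("algorithmic discrimination", "algorithmic discrimination"), ("algorithmic fairness", "algorithmic fairness"), ("automated decision-making", "welfare systems"), ("bias mitigation", "bias mitigation"), ("bias mitigation", "bias mitigation"), ("debiasing", "bias mitigation"), ("ethical ai", "ai ethics"), ("fairness", "algorithmic fairness"), ("fairness", "algorithmic fairness"), ("feminist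 ai", "feminist ai"), ("feminist ai", "feminist ai"), ("genai", "generative ai"), ("gender bias", "gender bias"), ("gender bias", "gender bias"), ("gender equity", "gender bias"), ("generative ai", "generative ai"), ("generative ai", "generative ai"), ("image generation bias", "visual bias"), ("intersectional bias", "intersectionality"), ("intersectionality", "intersectionality"), ("intersectionality", "intersectionality"), ("large language models", "large language models"), ("llm bias", "large language models"), ("llms", "large language models"), ("marginalized communities", "vulnerable populations"), ("professional context", "social work"), ("prompt design", "prompt engineering"), ("prompt engineering", "prompt engineering"), ("prompting", "prompt engineering"), ("responsible ai", "responsible ai"), ("responsible ai", "responsible ai"), ("social work", "social work"), ("social work practice", "social work"), ("trust in ai", "responsible ai"), ("trustworthy ai", "responsible ai"), ("visual bias", "visual bias"), ("visual bias", "visual bias"), ("vulnerable groups", "vulnerable populations"), ("vulnerable populations", "vulnerable populations"), ("welfare surveillance", "welfare systems"), ("welfare systems", "welfare systems")] := by decide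

-- soundness of the binary search: it only ever returns a canonical stored under exactly the target key
theorem bs_some_mem (tbl : List (String × String)) (target : String) :
    ∀ (fuel : Nat) (lo hi : Int) (c : String), bsLoop tbl target fuel lo hi = some c → (target, c) ∈ tbl := by
  intro fuel
  induction fuel with
  | zero => intro lo hi c h; simp [bsLoop] at h
  | succ n ih =>
      intro lo hi c h
      rw [bsLoop] at h
      split at h
      · rcases hg : PySem.List.pyGet? tbl (PySem.Int.floordiv (lo + hi) 2) with _ | ⟨key, canonical⟩
        · rw [hg] at h; exact absurd h (by simp)
        · rw [hg] at h
          dsimp only at h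
          by_cases hk : key == target
          · rw [if_pos hk] at h
            have hmem := PySem.List.mem_of_pyGet?_eq_some tbl hg
            have : key = target := by simpa using hk
            cases h; subst this; exact hmem
          · rw [if_neg hk] at h
            split at h
            · exact ih _ _ _ h
            · exact ih _ _ _ h
      · exact absurd h (by simp)

set_option maxRecDepth 20000 in
set_option maxHeartbeats 4000000 in
theorem pvCore (t : String) :
    (match pvScanTable t SYNONYMS with | some r => r | none => t)
      = (match bsLoop TABLE t (TABLE.length + 1) 0 ((TABLE.length : Int) - 1) with | some c => c | none => t) := by
  by_cases h0 : t = "algorithmic bias"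
  · subst h0; rw [pvTABLElit]; decide
  by_cases h1 : t = "ai bias"
  · subst h1; rw [pvTABLElit]; decide
  by_cases h2 : t = "algorithmic discrimination"
  · subst h2; rw [pvTABLElit]; decide
  by_cases h3 : t = "algorithmic fairness"
  · subst h3; rw [pvTABLElit]; decide
  by_cases h4 : t = "fairness"
  · subst h4; rw [pvTABLElit]; decide
  by_cases h5 : t = "ai fairness"
  · subst h5; rw [pvTABLElit]; decide
  by_cases h6 : t = "intersectionality"
  · subst h6; rw [pvTABLElit]; decide
  by_cases h7 : t = "intersectional bias"
  · subst h7; rw [pvTABLElit]; decide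
  by_cases h8 : t = "gender bias"
  · subst h8; rw [pvTABLElit]; decide
  by_cases h9 : t = "gender equity"
  · subst h9; rw [pvTABLElit]; decide
  by_cases h10 : t = "generative ai"
  · subst h10; rw [pvTABLElit]; decide
  by_cases h11 : t = "genai"
  · subst h11; rw [pvTABLElit]; decide
  by_cases h12 : t = "large language models"
  · subst h12; rw [pvTABLElit]; decide
  by_cases h13 : t = "llms"
  · subst h13; rw [pvTABLElit]; decide
  by_cases h14 : t = "llm bias"
  · subst h14; rw [pvTABLElit]; decide
  by_cases h15 : t = "responsible ai"
  · subst h15; rw [pvTABLElit]; decide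
  by_cases h16 : t = "trustworthy ai"
  · subst h16; rw [pvTABLElit]; decide
  by_cases h17 : t = "trust in ai"
  · subst h17; rw [pvTABLElit]; decide
  by_cases h18 : t = "bias mitigation"
  · subst h18; rw [pvTABLElit]; decide
  by_cases h19 : t = "debiasing"
  · subst h19; rw [pvTABLElit]; decide
  by_cases h20 : t = "feminist ai"
  · subst h20; rw [pvTABLElit]; decide
  by_cases h21 : t = "ai ethics"
  · subst h21; rw [pvTABLElit]; decide
  by_cases h22 : t = "ethical ai"
  · subst h22; rw [pvTABLElit]; decide
  by_cases h23 : t = "ai governance"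
  · subst h23; rw [pvTABLElit]; decide
  by_cases h24 : t = "visual bias"
  · subst h24; rw [pvTABLElit]; decide
  by_cases h25 : t = "image generation bias"
  · subst h25; rw [pvTABLElit]; decide
  by_cases h26 : t = "prompt engineering"
  · subst h26; rw [pvTABLElit]; decide
  by_cases h27 : t = "prompting"
  · subst h27; rw [pvTABLElit]; decide
  by_cases h28 : t = "prompt design"
  · subst h28; rw [pvTABLElit]; decide
  by_cases h29 : t = "social work"
  · subst h29; rw [pvTABLElit]; decide
  by_cases h30 : t = "social work practice"
  · subst h30; rw [pvTABLElit]; decide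
  by_cases h31 : t = "professional context"
  · subst h31; rw [pvTABLElit]; decide
  by_cases h32 : t = "vulnerable populations"
  · subst h32; rw [pvTABLElit]; decide
  by_cases h33 : t = "vulnerable groups"
  · subst h33; rw [pvTABLElit]; decide
  by_cases h34 : t = "marginalized communities"
  · subst h34; rw [pvTABLElit]; decide
  by_cases h35 : t = "welfare systems"
  · subst h35; rw [pvTABLElit]; decide
  by_cases h36 : t = "welfare surveillance"
  · subst h36; rw [pvTABLElit]; decide
  by_cases h37 : t = "automated decision-making"
  · subst h37; rw [pvTABLElit]; decide
  have hA : pvScanTable t SYNONYMS = none := by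
    simp only [pvScanTable, pvScanSyns, SYNONYMS, (show PySem.Str.lower "Algorithmic Bias" = "algorithmic bias" from by decide), (show PySem.Str.lower "AI bias" = "ai bias" from by decide), (show PySem.Str.lower "AI Bias" = "ai bias" from by decide), (show PySem.Str.lower "Algorithmic Discrimination" = "algorithmic discrimination" from by decide), (show PySem.Str.lower "fairness" = "fairness" from by decide), (show PySem.Str.lower "Fairness" = "fairness" from by decide), (show PySem.Str.lower "AI fairness" = "ai fairness" from by decide), (show PySem.Str.lower "AI Fairness" = "ai fairness" from by decide), (show PySem.Str.lower "Intersectionality" = "intersectionality" from by decide), (show PySem.Str.lower "intersectional bias" = "intersectional bias" from by decide), (show PySem.Str.lower "Gender Bias" = "gender bias" from by decide), (show PySem.Str.lower "gender equity" = "gender equity" from by decide), (show PySem.Str.lower "Generative AI" = "generative ai" from by decide), (show PySem.Str.lower "GenAI" = "genai" from by decide), (show PySem.Str.lower "LLMs" = "llms" from by decide), (show PySem.Str.lower "LLM bias" = "llm bias" from by decide), (show PySem.Str.lower "Responsible AI" = "responsible ai" from by decide), (show PySem.Str.lower "trustworthy AI" = "trustworthy ai" from by decide), (show PySem.Str.lower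 "trust in AI" = "trust in ai" from by decide), (show PySem.Str.lower "Bias Mitigation" = "bias mitigation" from by decide), (show PySem.Str.lower "debiasing" = "debiasing" from by decide), (show PySem.Str.lower "Feminist AI" = "feminist ai" from by decide), (show PySem.Str.lower "AI ethics" = "ai ethics" from by decide), (show PySem.Str.lower "ethical AI" = "ethical ai" from by decide), (show PySem.Str.lower "AI governance" = "ai governance" from by decide), (show PySem.Str.lower "visual bias" = "visual bias" from by decide), (show PySem.Str.lower "image generation bias" = "image generation bias" from by decide), (show PySem.Str.lower "prompting" = "prompting" from by decide), (show PySem.Str.lower "prompt design" = "prompt design" from by decide), (show PySem.Str.lower "social work practice" = "social work practice" from by decide), (show PySem.Str.lower "professional context" = "professional context" from by decide), (show PySem.Str.lower "vulnerable groups" = "vulnerable groups" from by decide), (show PySem.Str.lower "marginalized communities" = "marginalized communities" from by decide), (show PySem.Str.lower "welfare surveillance" = "welfare surveillance" from by decide), (show PySem.Str.lower "automated decision-making" = "automated decision-making" from by decide)]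
    simp [beq_iff_eq, h0, h1, h2, h3, h4, h5, h6, h7, h8, h9, h10, h11, h12, h13, h14, h15, h16, h17, h18, h19, h20, h21, h22, h23, h24, h25, h26, h27, h28, h29, h30, h31, h32, h33, h34, h35, h36, h37]
  rw [hA]
  rcases hbs : bsLoop TABLE t (TABLE.length + 1) 0 ((TABLE.length : Int) - 1) with _ | c
  · rfl
  · exfalso
    have hmem := bs_some_mem TABLE t _ _ _ _ hbs
    rw [pvTABLElit] at hmem
    simp [Prod.mk.injEq, h0, h1, h2, h3, h4, h5, h6, h7, h8, h9, h10, h11, h12, h13, h14, h15, h16, h17, h18, h19, h20, h21, h22, h23, h24, h25, h26, h27, h28, h29, h30, h31, h32, h33, h34, h35, h36, h37] at hmem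

-- ===== VERDICT (by name: the statement is the Claim_ definition above) =====
set_option maxRecDepth 20000 in
set_option maxHeartbeats 2000000 in
theorem normalize_keyword_spec : Claim_equal_normalize_keyword := by
  intro keyword _
  unfold Spec_normalize_keyword normalize_keyword normalize_keyword_alt
  exact pvCore (PySem.Str.lower (PySem.Str.strip keyword))
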